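-- pv_equiv track=rewrite | github.com/mukeshvarmag/Python | inter3.py | solve
-- ===== SOURCE A (Python) =====
-- def solve(A, B):
--     i= 0
--
--     res=0
--     while(i<len(A)):
--         j = min(i+B-1,len(A)-1)
--         flag = False
--         while(flag==False and j>0 and j > i-B+1):
--             if (A[j]==1):
--                 flag = True
--                 res +=1
--             j-=1
--         i = j+1+B
--         if(flag==False):
--             return -1
--     return res
-- ===== SOURCE B (Python) =====
-- def solve(A, B):
--     n = len(A)
--     # one left-to-right pass: prev[j] = largest index k in [1, j] with A[k] == 1, else -1
--     prev = [-1]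
--     last = -1
--     for j in range(1, n):
--         if A[j] == 1:
--             last = j
--         prev.append(last)
--     res = 0
--     i = 0
--     while i < n:
--         hi = min(i + B - 1, n - 1)
--         lo = max(1, i - B + 2)
--         if hi < lo or prev[hi] < lo:
--             return -1
--         res += 1
--         i = prev[hi] + B
--     return res
-- ===== Notes on version B (the rewrite author's own statement) =====
-- stated objective: alternative
-- what changed: A rescans each greedy window backwards for its highest 1; B makes one left-to-right pass precomputing a 'last 1-index at or below j' table and then answers each window with an O(1) table lookup.
import Mathlib
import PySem

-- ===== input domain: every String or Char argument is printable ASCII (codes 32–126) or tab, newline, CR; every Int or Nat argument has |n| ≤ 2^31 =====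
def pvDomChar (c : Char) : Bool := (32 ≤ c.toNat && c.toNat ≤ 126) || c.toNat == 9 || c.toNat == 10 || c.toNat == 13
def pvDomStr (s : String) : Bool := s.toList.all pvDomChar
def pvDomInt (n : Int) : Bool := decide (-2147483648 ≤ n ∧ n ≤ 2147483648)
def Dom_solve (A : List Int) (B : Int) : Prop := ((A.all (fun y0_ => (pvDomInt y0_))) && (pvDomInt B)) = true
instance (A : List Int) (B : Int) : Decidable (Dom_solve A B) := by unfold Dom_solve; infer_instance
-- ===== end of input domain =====

-- B replaces A's backward inner scan of each window by a single left-to-right precomputed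
-- "last 1 at index ≤ j" table with O(1) lookups per window (objective: alternative).

-- ===== PORT A =====
-- inner while loop: scans j downward while (not flag and j>0 and j>lb); returns (flag, final j).
-- fuel is a totality guard only: it is A.length at every call, which exceeds the iteration count.
def innerA (A : List Int) (lb : Int) : Nat → Int → Bool × Int
  | 0, j => (false, j)
  | fuel+1, j =>
    if j > 0 ∧ j > lb then
      if (PySem.List.pyGet? A j).getD 0 = 1 then (true, j - 1)
      else innerA A lb fuel (j - 1)
    else (false, j)

-- outer while loop of A; fuel (= A.length + 1) is a totality guard, i grows by ≥ 2 per iteration.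
def outerA (A : List Int) (B : Int) : Nat → Int → Int → Int
  | 0, _, res => res
  | fuel+1, i, res =>
    if i < (A.length : Int) then
      let r := innerA A (i - B + 1) A.length (min (i + B - 1) ((A.length : Int) - 1))
      if r.1 then outerA A B fuel (r.2 + 1 + B) (res + 1) else -1
    else res

def solve (A : List Int) (B : Int) : Int := outerA A B (A.length + 1) 0 0

-- ===== PORT B =====
-- one step of B's precompute loop: append the latest index j ≤ current with A[j] == 1 (or -1).
def buildStep (A : List Int) (st : List Int × Int) (j : Int) : List Int × Int :=
  let last := if (PySem.List.pyGet? A j).getD 0 = 1 then j else st.2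
  (st.1 ++ [last], last)

-- B's while loop: O(1) table lookup per window; fuel as in outerA.
def loopB (A prev : List Int) (B : Int) : Nat → Int → Int → Int
  | 0, _, res => res
  | fuel+1, i, res =>
    if i < (A.length : Int) then
      let hi := min (i + B - 1) ((A.length : Int) - 1)
      let lo := max 1 (i - B + 2)
      if hi < lo then -1
      else if (PySem.List.pyGet? prev hi).getD 0 < lo then -1
      else loopB A prev B fuel ((PySem.List.pyGet? prev hi).getD 0 + B) (res + 1)
    else res

def solve_alt (A : List Int) (B : Int) : Int :=
  let prev := ((PySem.List.pyRange 1 (A.length : Int) 1).foldl (buildStep A) ([-1], -1)).1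
  loopB A prev B (A.length + 1) 0 0

-- ===== PRECONDITION & SPEC =====
def Spec_solve (A : List Int) (B : Int) (out : Int) : Prop := out = solve_alt A B
instance (A : List Int) (B : Int) (out : Int) : Decidable (Spec_solve A B out) := by unfold Spec_solve; infer_instance

-- ===== CLAIM (what is proved, stated in full; the proofs are below) =====
def Claim_equal_solve : Prop := ∀ (A : List Int) (B : Int), Dom_solve A B → Spec_solve A B (solve A B)

-- ===== LEMMAS AND PROOFS =====

-- specification of the table: lastOne A k = largest m ∈ [1,k] with A[m] == 1, else -1
def lastOne (A : List Int) : Nat → Int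
  | 0 => -1
  | k+1 => if (PySem.List.pyGet? A ((k+1 : Nat) : Int)).getD 0 = 1 then ((k+1 : Nat) : Int) else lastOne A k

def lastOneI (A : List Int) (j : Int) : Int := if j ≤ 0 then -1 else lastOne A j.toNat

theorem lastOne_le (A : List Int) (k : Nat) : lastOne A k ≤ (k : Int) := by
  induction k with
  | zero => simp [lastOne]
  | succ k ih =>
    simp only [lastOne]
    split
    · exact le_refl _
    · exact le_trans ih (by push_cast; omega)

theorem build_spec (A : List Int) (m : Nat) (hm : 1 ≤ m) :
    (PySem.List.pyRange 1 (m : Int) 1).foldl (buildStep A) ([-1], -1)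
      = ((List.range m).map (fun k => lastOne A k), lastOne A (m - 1)) := by
  induction m with
  | zero => omega
  | succ m ih =>
    rcases Nat.eq_or_lt_of_le hm with h1 | h1
    · have : (m : Int) + 1 = (1 : Int) := by omega
      simp only [← h1]
      rw [show ((1 : Nat) : Int) = (1 : Int) by norm_num,
        PySem.List.pyRange_one_eq_nil (by omega)]
      simp [lastOne, List.range_succ]
    · have hm1 : 1 ≤ m := by omega
      have hsplit : PySem.List.pyRange 1 ((m : Int) + 1) 1
          = PySem.List.pyRange 1 (m : Int) 1 ++ [(m : Int)] :=
        PySem.List.pyRange_one_succ_right (by omega)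
      push_cast
      rw [hsplit, List.foldl_append, ih hm1]
      simp only [List.foldl, buildStep]
      obtain ⟨k, rfl⟩ : ∃ k, m = k + 1 := ⟨m - 1, by omega⟩
      have hlast : (if (PySem.List.pyGet? A ((k+1 : Nat) : Int)).getD 0 = 1
            then ((k+1 : Nat) : Int) else lastOne A ((k+1) - 1)) = lastOne A (k+1) := by
        simp only [lastOne]
        rw [show (k+1) - 1 = k by omega]
      rw [Prod.mk.injEq]
      refine ⟨?_, ?_⟩
      · conv_rhs => rw [List.range_succ, List.map_append]
        simp only [List.map]
        rw [hlast]
      · exact hlast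

theorem inner_spec (A : List Int) (lb : Int) :
    ∀ (fuel : Nat) (j : Int), j.toNat < fuel →
      (lastOneI A j ≥ max 1 (lb + 1) → innerA A lb fuel j = (true, lastOneI A j - 1)) ∧
      (lastOneI A j < max 1 (lb + 1) → (innerA A lb fuel j).1 = false) := by
  intro fuel
  induction fuel with
  | zero => intro j hj; omega
  | succ fuel ih =>
    intro j hj
    by_cases hc : j > 0 ∧ j > lb
    · have hj1 : ¬ j ≤ 0 := by omega
      have hjcast : ((j.toNat : Int)) = j := by omega
      by_cases hone : (PySem.List.pyGet? A j).getD 0 = 1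
      · have hlast : lastOneI A j = j := by
          unfold lastOneI
          rw [if_neg hj1]
          obtain ⟨k, hk⟩ : ∃ k, j.toNat = k + 1 := ⟨j.toNat - 1, by omega⟩
          rw [hk]
          simp only [lastOne]
          rw [show ((k+1 : Nat) : Int) = j by omega, if_pos hone]
        constructor
        · intro _
          simp only [innerA, if_pos hc, if_pos hone, hlast]
        · intro hlt; rw [hlast] at hlt; omega
      · have hstep : lastOneI A j = lastOneI A (j - 1) := by
          unfold lastOneI
          rw [if_neg hj1]
          obtain ⟨k, hk⟩ : ∃ k, j.toNat = k + 1 := ⟨j.toNat - 1, by omega⟩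
          rw [hk]
          simp only [lastOne]
          rw [show ((k+1 : Nat) : Int) = j by omega, if_neg hone]
          by_cases hj2 : j - 1 ≤ 0
          · rw [if_pos hj2]
            have : k = 0 := by omega
            simp [this, lastOne]
          · rw [if_neg hj2, show (j-1).toNat = k by omega]
        have ih' := ih (j - 1) (by omega)
        constructor
        · intro hge
          simp only [innerA, if_pos hc, if_neg hone]
          rw [hstep] at hge ⊢
          exact (ih'.1 hge)
        · intro hlt
          simp only [innerA, if_pos hc, if_neg hone]
          rw [hstep] at hlt
          exact ih'.2 hlt
    · have hres : innerA A lb (fuel+1) j = (false, j) := by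
        simp only [innerA, if_neg hc]
      constructor
      · intro hge
        exfalso
        have hle : lastOneI A j ≤ max j (-1) := by
          unfold lastOneI
          split
          · omega
          · have := lastOne_le A j.toNat
            have : lastOne A j.toNat ≤ j := le_trans this (by omega)
            omega
        omega
      · intro _; rw [hres]

theorem prev_get (A : List Int) (h : Int) (h1 : 1 ≤ h) (h2 : h < (A.length : Int)) :
    (PySem.List.pyGet? ((List.range A.length).map (fun k => lastOne A k)) h).getD 0
      = lastOneI A h := by
  have h0 : 0 ≤ h := by omega
  rw [PySem.List.pyGet?_of_nonneg _ h0]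
  have hlt : h.toNat < A.length := by omega
  rw [List.getElem?_map]
  simp only [List.getElem?_range hlt, Option.map_some, Option.getD_some]
  unfold lastOneI
  rw [if_neg (by omega)]

theorem lockstep (A : List Int) (B : Int) (hn : 1 ≤ A.length) :
    ∀ (fuel : Nat) (i res : Int),
      outerA A B fuel i res
        = loopB A ((List.range A.length).map (fun k => lastOne A k)) B fuel i res := by
  intro fuel
  induction fuel with
  | zero => intro i res; simp [outerA, loopB]
  | succ fuel ih =>
    intro i res
    simp only [outerA, loopB]
    by_cases hi : i < (A.length : Int)
    · rw [if_pos hi, if_pos hi]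
      set hi' := min (i + B - 1) ((A.length : Int) - 1) with hhidef
      set lo := max 1 (i - B + 2) with hlodef
      have hfuel : hi'.toNat < A.length := by
        have : hi' ≤ (A.length : Int) - 1 := min_le_right _ _
        omega
      have hspec := inner_spec A (i - B + 1) A.length hi' hfuel
      have hlo : lo = max 1 ((i - B + 1) + 1) := by omega
      by_cases hwin : hi' < lo
      · rw [if_pos hwin]
        have hplt : lastOneI A hi' < lo := by
          unfold lastOneI
          split
          · omega
          · have := lastOne_le A hi'.toNat
            omega
        have := hspec.2 (by omega)
        rw [this]
        simp
      · rw [if_neg hwin]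
        have hh1 : 1 ≤ hi' := by omega
        have hget := prev_get A hi' hh1 (by omega)
        rw [hget]
        by_cases hp : lastOneI A hi' < lo
        · rw [if_pos hp]
          have := hspec.2 (by omega)
          rw [this]
          simp
        · rw [if_neg hp]
          have := hspec.1 (by omega)
          rw [this]
          simp only []
          rw [if_pos trivial, show lastOneI A hi' - 1 + 1 + B = lastOneI A hi' + B by ring]
          exact ih _ _
    · rw [if_neg hi, if_neg hi]

-- ===== VERDICT (by name: the statement is the Claim_ definition above) =====
theorem solve_spec : Claim_equal_solve := by
  intro A B _
  unfold Spec_solve solve solve_alt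
  by_cases hn : 1 ≤ A.length
  · rw [build_spec A A.length hn]
    exact lockstep A B hn _ _ _
  · have h0 : A.length = 0 := by omega
    simp only [h0]
    simp [outerA, loopB, h0]
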